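-- pv_equiv track=rewrite | github.com/OmKale000/DSA | Daily Problem/Making Row and Column Sums Equal.py | balanceSum
-- ===== SOURCE A (Python) =====
-- def balanceSum(mat):
--     n = len(mat)
--     res = 0
--     maxSum = 0
--
--     for i in range(n):
--         sum = 0
--         for j in range(n):
--             sum += mat[i][j]
--         maxSum = max(sum, maxSum)
--
--     for j in range(n):
--         sum = 0
--         for i in range(n):
--             sum += mat[i][j]
--         maxSum = max(sum, maxSum)
--
--     for i in range(n):
--         sum = 0
--         for j in range(n):
--             sum += mat[i][j]
--         res += (maxSum - sum)
--
--     return res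
-- ===== SOURCE B (Python) =====
-- def balanceSum(mat):
--     n = len(mat)
--     cols = [0] * n
--     total = 0
--     best = 0
--     for row in mat:
--         s = 0
--         for j in range(n):
--             cols[j] += row[j]
--             s += row[j]
--         total += s
--         if s > best:
--             best = s
--     for c in cols:
--         if c > best:
--             best = c
--     return n * best - total
-- ===== Notes on version B (the rewrite author's own statement) =====
-- stated objective: alternative
-- what changed: B makes a single streaming pass over the rows, accumulating the column-sum vector, the running total and the running row max together, then returns the closed form n*best - total instead of A's three separate nested max/accumulation passes.
import Mathlib
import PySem

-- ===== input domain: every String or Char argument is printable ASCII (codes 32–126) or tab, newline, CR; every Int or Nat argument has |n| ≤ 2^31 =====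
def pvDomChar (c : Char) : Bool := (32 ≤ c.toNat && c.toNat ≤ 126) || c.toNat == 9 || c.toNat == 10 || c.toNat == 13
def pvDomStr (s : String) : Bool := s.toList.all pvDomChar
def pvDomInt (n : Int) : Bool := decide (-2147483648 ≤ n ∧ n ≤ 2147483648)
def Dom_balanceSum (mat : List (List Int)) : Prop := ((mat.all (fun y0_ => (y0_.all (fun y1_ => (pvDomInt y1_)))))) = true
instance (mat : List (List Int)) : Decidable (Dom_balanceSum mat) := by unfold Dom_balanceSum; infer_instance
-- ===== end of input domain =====

-- B replaces A's three separate nested passes (row max, column max, per-row accumulation) by a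
-- single streaming pass over the rows that accumulates the column-sum vector, the running total
-- and the running row max together, and then returns the closed form n*best - total
-- (alternative decomposition, same asymptotic cost).

-- ===== PORT A =====
-- mat[i][j] is ported as pyGetD/pyGetD; Pre_ guarantees every index is in range, where this is exact.
def balanceSum (mat : List (List Int)) : Int :=
  let n : Int := (mat.length : Int)
  let maxSum1 : Int := (PySem.List.pyRange 0 n 1).foldl (fun maxSum i =>
    max ((PySem.List.pyRange 0 n 1).foldl (fun s j =>
      s + PySem.List.pyGetD (PySem.List.pyGetD mat i []) j 0) 0) maxSum) 0
  let maxSum2 : Int := (PySem.List.pyRange 0 n 1).foldl (fun maxSum j =>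
    max ((PySem.List.pyRange 0 n 1).foldl (fun s i =>
      s + PySem.List.pyGetD (PySem.List.pyGetD mat i []) j 0) 0) maxSum) maxSum1
  (PySem.List.pyRange 0 n 1).foldl (fun res i =>
    res + (maxSum2 - (PySem.List.pyRange 0 n 1).foldl (fun s j =>
      s + PySem.List.pyGetD (PySem.List.pyGetD mat i []) j 0) 0)) 0

-- ===== PORT B =====
-- row[j] is ported as pyGetD (Pre_ guarantees the index is in range); cols[j] += … is a set at
-- j.toNat, exact because j ranges over 0..n-1 (never negative) and len(cols) = n throughout.
def balanceSum_alt (mat : List (List Int)) : Int :=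
  let n : Int := (mat.length : Int)
  let st := mat.foldl (fun (st : List Int × Int × Int) row =>
      let inner := (PySem.List.pyRange 0 n 1).foldl (fun (p : List Int × Int) j =>
          (p.1.set j.toNat (PySem.List.pyGetD p.1 j 0 + PySem.List.pyGetD row j 0),
           p.2 + PySem.List.pyGetD row j 0)) (st.1, 0)
      (inner.1, st.2.1 + inner.2, if inner.2 > st.2.2 then inner.2 else st.2.2))
    (List.replicate mat.length 0, 0, 0)
  let best := st.1.foldl (fun b c => if c > b then c else b) st.2.2
  n * best - st.2.1

-- ===== PRECONDITION & SPEC =====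
-- Pre_ excludes exactly the matrices with a row shorter than len(mat), on which A (and B) raise IndexError.
def Pre_balanceSum (mat : List (List Int)) : Prop :=
  ∀ row ∈ mat, mat.length ≤ row.length
instance (mat : List (List Int)) : Decidable (Pre_balanceSum mat) := by unfold Pre_balanceSum; infer_instance
def pvWitness_balanceSum : List (List Int) := [[1, 2], [3, 4]]

def Spec_balanceSum (mat : List (List Int)) (out : Int) : Prop := out = balanceSum_alt mat
instance (mat : List (List Int)) (out : Int) : Decidable (Spec_balanceSum mat out) := by unfold Spec_balanceSum; infer_instance

-- ===== CLAIM (what is proved, stated in full; the proofs are below) =====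
def Claim_equal_balanceSum : Prop := ∀ (mat : List (List Int)), Dom_balanceSum mat → Pre_balanceSum mat → Spec_balanceSum mat (balanceSum mat)

-- ===== LEMMAS AND PROOFS =====

theorem map_range_getD_self (cols : List Int) :
    (List.range cols.length).map (fun j => cols.getD j 0) = cols := by
  apply List.ext_getElem
  · simp
  · intro i h1 h2
    simp at h1 ⊢
    rw [List.getElem?_eq_getElem (by omega)]
    simp

theorem map_range_getD_mat {α β : Type} [Inhabited α] (xs : List α) (f : α → β) (d : α) :
    (List.range xs.length).map (fun i => f (xs.getD i d)) = xs.map f := by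
  apply List.ext_getElem
  · simp
  · intro i h1 h2
    simp at h1 ⊢
    rw [List.getElem?_eq_getElem (by simpa using h1)]
    simp

theorem getD_replicate_zero (n j : Nat) : (List.replicate n (0:Int)).getD j 0 = 0 := by
  simp [List.getD, List.getElem?_replicate]
  split <;> rfl

theorem if_gt_eq_max (b c : Int) : (if c > b then c else b) = max b c := by
  rw [max_def]; split_ifs <;> omega

theorem foldl_max_proj {α : Type} (L : List α) (f : α → Int) (a : Int) :
    L.foldl (fun mx x => max (f x) mx) a = (L.map f).foldl max a := by
  induction L generalizing a with
  | nil => rfl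
  | cons x t ih => rw [List.foldl_cons, List.map_cons, List.foldl_cons, ih, max_comm]

theorem sum_map_sub_const (mat : List (List Int)) (M : Int) (f : List Int → Int) :
    (mat.map (fun row => M - f row)).sum = (mat.length : Int) * M - (mat.map f).sum := by
  induction mat with
  | nil => simp
  | cons r t ih => simp [ih]; ring

-- a fold over range whose pair components are independent splits into two folds
theorem foldl_pair_split {α β : Type} (L : List Nat) (g : α → Nat → α) (h : β → Nat → β)
    (c : α) (s : β) :
    L.foldl (fun (p : α × β) j => (g p.1 j, h p.2 j)) (c, s) = (L.foldl g c, L.foldl h s) := by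
  induction L generalizing c s with
  | nil => rfl
  | cons j t ih => simp [List.foldl_cons, ih]

-- B's inner column update: folding `set j (getD j + g j)` over range k adds g pointwise below k
theorem fold_set_range (cols : List Int) (g : Nat → Int) (k : Nat) (hk : k ≤ cols.length) :
    (List.range k).foldl (fun c j => c.set j (c.getD j 0 + g j)) cols
      = (List.range cols.length).map
          (fun j => if j < k then cols.getD j 0 + g j else cols.getD j 0) := by
  induction k with
  | zero =>
    simp only [List.range_zero, List.foldl_nil, Nat.not_lt_zero, if_false]
    exact (map_range_getD_self cols).symm
  | succ k ih =>
    have hk' : k ≤ cols.length := by omega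
    rw [List.range_succ, List.foldl_append, List.foldl_cons, List.foldl_nil, ih hk']
    have hprevD : ∀ m, m < cols.length →
        ((List.range cols.length).map
            (fun j => if j < k then cols.getD j 0 + g j else cols.getD j 0)).getD m 0
          = if m < k then cols.getD m 0 + g m else cols.getD m 0 := by
      intro m hm
      rw [List.getD_eq_getElem _ _ (by simpa using hm)]
      simp
    apply List.ext_getElem
    · simp
    · intro i h1 h2
      simp only [List.length_set, List.length_map, List.length_range] at h1 h2
      rw [List.getElem_set]
      by_cases hik : k = i
      · subst hik
        rw [if_pos rfl, hprevD k (by omega), if_neg (lt_irrefl k)]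
        simp only [List.getElem_map, List.getElem_range]
        rw [if_pos (Nat.lt_succ_self k)]
      · rw [if_neg hik]
        simp only [List.getElem_map, List.getElem_range]
        by_cases hlt : i < k
        · rw [if_pos hlt, if_pos (by omega)]
        · rw [if_neg hlt, if_neg (by omega)]

-- characterization of B's streaming fold (the triple of column sums, total and running max)
theorem fold_triple (n : Nat) (rows : List (List Int)) (cols : List Int) (total best : Int)
    (h : cols.length = n) :
    rows.foldl (fun (st : List Int × Int × Int) row =>
        ((List.range n).map (fun j => st.1.getD j 0 + row.getD j 0),
         st.2.1 + ((List.range n).map (fun j => row.getD j 0)).sum,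
         if ((List.range n).map (fun j => row.getD j 0)).sum > st.2.2
           then ((List.range n).map (fun j => row.getD j 0)).sum else st.2.2))
      (cols, total, best)
    = ((List.range n).map (fun j => cols.getD j 0 + (rows.map (fun r => r.getD j 0)).sum),
       total + (rows.map (fun r => ((List.range n).map (fun j => r.getD j 0)).sum)).sum,
       (rows.map (fun r => ((List.range n).map (fun j => r.getD j 0)).sum)).foldl max best) := by
  induction rows generalizing cols total best with
  | nil =>
    simp only [List.foldl_nil, List.map_nil, List.sum_nil, add_zero, List.foldl_nil]
    refine Prod.ext ?_ rfl
    subst h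
    simpa using (map_range_getD_self cols).symm
  | cons r t ih =>
    have hlen : ((List.range n).map (fun j => cols.getD j 0 + r.getD j 0)).length = n := by simp
    rw [List.foldl_cons, ih _ _ _ hlen]
    refine Prod.ext ?_ (Prod.ext (by simp [add_assoc]) ?_)
    · simp only
      apply List.map_congr_left
      intro j hj
      have hjlt : j < n := List.mem_range.mp hj
      have : ((List.range n).map (fun j => cols.getD j 0 + r.getD j 0)).getD j 0
          = cols.getD j 0 + r.getD j 0 := by
        rw [List.getD_eq_getElem _ _ (by simpa using hjlt)]
        simp
      simp only [List.map_cons, List.sum_cons, this]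
      ring
    · simp [if_gt_eq_max]

-- ===== VERDICT (by name: the statement is the Claim_ definition above) =====
theorem balanceSum_spec : Claim_equal_balanceSum := by
  intro mat _ _
  unfold Spec_balanceSum balanceSum balanceSum_alt
  simp only [PySem.List.pyRange_zero_natCast, List.foldl_map,
    PySem.List.pyGetD_natCast, Int.toNat_natCast]
  -- split B's inner pair fold and evaluate both components
  have hinner : ∀ (cols row : List Int), cols.length = mat.length →
      (List.range mat.length).foldl (fun (p : List Int × Int) j =>
          (p.1.set j (p.1.getD j 0 + row.getD j 0), p.2 + row.getD j 0)) (cols, 0)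
        = ((List.range mat.length).map (fun j => cols.getD j 0 + row.getD j 0),
           ((List.range mat.length).map (fun j => row.getD j 0)).sum) := by
    intro cols row hlen
    rw [foldl_pair_split (List.range mat.length)
        (fun c j => c.set j (c.getD j 0 + row.getD j 0)) (fun s j => s + row.getD j 0) cols 0,
      fold_set_range cols (fun j => row.getD j 0) mat.length (by omega), hlen]
    refine Prod.ext ?_ ?_
    · simp only
      exact List.map_congr_left (fun j hj => by simp [List.mem_range.mp hj])
    · simp only
      rw [PySem.List.foldl_add, zero_add]
  -- rewrite the row-level fold: every reachable cols state has length n, so hinner applies;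
  -- do it by a congruence fold with the invariant carried through fold_triple's statement
  have hfold : mat.foldl (fun (st : List Int × Int × Int) row =>
        let inner := (List.range mat.length).foldl (fun (p : List Int × Int) j =>
            (p.1.set j (p.1.getD j 0 + row.getD j 0), p.2 + row.getD j 0)) (st.1, 0)
        (inner.1, st.2.1 + inner.2, if inner.2 > st.2.2 then inner.2 else st.2.2))
      (List.replicate mat.length 0, 0, 0)
      = ((List.range mat.length).map
            (fun j => (List.replicate mat.length (0:Int)).getD j 0 + (mat.map (fun r => r.getD j 0)).sum),
         0 + (mat.map (fun r => ((List.range mat.length).map (fun j => r.getD j 0)).sum)).sum,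
         (mat.map (fun r => ((List.range mat.length).map (fun j => r.getD j 0)).sum)).foldl max 0) := by
    rw [← fold_triple mat.length mat (List.replicate mat.length 0) 0 0 (by simp)]
    -- the two step functions agree on every state whose cols component has length n
    have key : ∀ (rows : List (List Int)) (st : List Int × Int × Int),
        st.1.length = mat.length →
        rows.foldl (fun (st : List Int × Int × Int) row =>
            let inner := (List.range mat.length).foldl (fun (p : List Int × Int) j =>
                (p.1.set j (p.1.getD j 0 + row.getD j 0), p.2 + row.getD j 0)) (st.1, 0)
            (inner.1, st.2.1 + inner.2, if inner.2 > st.2.2 then inner.2 else st.2.2)) st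
          = rows.foldl (fun (st : List Int × Int × Int) row =>
              ((List.range mat.length).map (fun j => st.1.getD j 0 + row.getD j 0),
               st.2.1 + ((List.range mat.length).map (fun j => row.getD j 0)).sum,
               if ((List.range mat.length).map (fun j => row.getD j 0)).sum > st.2.2
                 then ((List.range mat.length).map (fun j => row.getD j 0)).sum else st.2.2)) st := by
      intro rows
      induction rows with
      | nil => intro st _; rfl
      | cons r t ih =>
        intro st hst
        simp only [List.foldl_cons]
        rw [show ((List.range mat.length).foldl (fun (p : List Int × Int) j =>
              (p.1.set j (p.1.getD j 0 + r.getD j 0), p.2 + r.getD j 0)) (st.1, 0))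
            = ((List.range mat.length).map (fun j => st.1.getD j 0 + r.getD j 0),
               ((List.range mat.length).map (fun j => r.getD j 0)).sum) from hinner st.1 r hst]
        exact ih _ (by simp)
    exact key mat _ (by simp)
  rw [hfold]
  simp only [getD_replicate_zero, zero_add]
  -- identify B's column list and row sums with A's
  have hcolsum : ∀ j ∈ List.range mat.length,
      (mat.map (fun r => r.getD j 0)).sum
        = (List.range mat.length).foldl (fun s i => s + (mat.getD i []).getD j 0) 0 := by
    intro j _
    rw [PySem.List.foldl_add, zero_add, map_range_getD_mat mat (fun r => r.getD j 0) []]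
  have hrowsum : ∀ (r : List Int),
      ((List.range mat.length).map (fun j => r.getD j 0)).sum
        = (List.range mat.length).foldl (fun s j => s + r.getD j 0) 0 := by
    intro r
    rw [PySem.List.foldl_add, zero_add]
  -- A's first loop (row maxima) equals B's running row max
  have h1 : (List.range mat.length).foldl (fun maxSum i =>
        max ((List.range mat.length).foldl (fun s j => s + (mat.getD i []).getD j 0) 0) maxSum) 0
      = (mat.map (fun r => ((List.range mat.length).map (fun j => r.getD j 0)).sum)).foldl max 0 := by
    rw [foldl_max_proj, ← map_range_getD_mat mat
        (fun r => ((List.range mat.length).map (fun j => r.getD j 0)).sum) []]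
    congr 1
    exact List.map_congr_left (fun i _ => (hrowsum (mat.getD i [])).symm)
  -- A's second loop (column maxima) equals B's final max over the column-sum list
  have h2 : (List.range mat.length).foldl (fun maxSum j =>
        max ((List.range mat.length).foldl (fun s i => s + (mat.getD i []).getD j 0) 0) maxSum)
        ((mat.map (fun r => ((List.range mat.length).map (fun j => r.getD j 0)).sum)).foldl max 0)
      = ((List.range mat.length).map (fun j => (mat.map (fun r => r.getD j 0)).sum)).foldl
          (fun b c => if c > b then c else b)
          ((mat.map (fun r => ((List.range mat.length).map (fun j => r.getD j 0)).sum)).foldl max 0) := by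
    rw [foldl_max_proj,
      show (fun b c : Int => if c > b then c else b) = max from
        funext fun b => funext fun c => if_gt_eq_max b c]
    congr 1
    exact (List.map_congr_left hcolsum).symm
  rw [← h2, ← h1]
  set M : Int := (List.range mat.length).foldl (fun maxSum j =>
        max ((List.range mat.length).foldl (fun s i => s + (mat.getD i []).getD j 0) 0) maxSum)
        ((List.range mat.length).foldl (fun maxSum i =>
          max ((List.range mat.length).foldl (fun s j => s + (mat.getD i []).getD j 0) 0) maxSum) 0)
    with hM
  -- A's third loop: Σ_i (M - rowSum_i) = n*M - Σ rowSums
  rw [show ((List.range mat.length).foldl (fun res i =>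
        res + (M - (List.range mat.length).foldl (fun s j => s + (mat.getD i []).getD j 0) 0)) 0)
      = ((List.range mat.length).map (fun i =>
          M - ((List.range mat.length).map (fun j => (mat.getD i []).getD j 0)).sum)).sum from by
      rw [PySem.List.foldl_add, zero_add]
      exact congrArg List.sum
        (List.map_congr_left (fun i _ => by rw [hrowsum (mat.getD i [])])),
    map_range_getD_mat mat
      (fun row => M - ((List.range mat.length).map (fun j => row.getD j 0)).sum) [],
    sum_map_sub_const]
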